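-- pv_equiv track=rewrite | github.com/cirosantilli/project-euler-solutions | solvers/302.py | factorize_with_spf
-- ===== SOURCE A (Python) =====
-- from typing import Dict, List, Tuple, Set
--
-- def factorize_with_spf(x: int, spf: List[int]) -> List[Tuple[int, int]]:
--     """Prime factorization as (prime, exponent) pairs for x >= 1."""
--     res: List[Tuple[int, int]] = []
--     while x > 1:
--         p = spf[x]
--         cnt = 1
--         x //= p
--         while x % p == 0:
--             cnt += 1
--             x //= p
--         res.append((p, cnt))
--     return res
-- ===== SOURCE B (Python) =====
-- from typing import Dict, List, Tuple
--
-- def factorize_with_spf(x: int, spf: List[int]) -> List[Tuple[int, int]]: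
--     """Prime factorization as (prime, exponent) pairs for x >= 1."""
--     if x <= 1:
--         return []
--     p = spf[x]
--     rest = factorize_with_spf(x // p, spf)
--     if rest and rest[0][0] == p:
--         return [(p, rest[0][1] + 1)] + rest[1:]
--     return [(p, 1)] + rest
-- ===== Notes on version B (the rewrite author's own statement) =====
-- stated objective: alternative
-- what changed: A's nested iterative loops (outer over primes, inner stripping each prime's run with a counter) are replaced by a single structural recursion with no loops and no counter: recurse on x // spf[x] and merge the prime into the head of the recursive result ((p, c+1) if the head is already p, else cons (p, 1)), relying on spf chains being nondecreasing.
-- outside the precondition, e.g. on factorize_with_spf(3, [0, 0, 2, 2]): A returns [(2, 1)], B returns [(2, 1)]; on factorize_with_spf(8, [0, 0, 2, 0, 4, 0, 0, 0, 2]): A returns [(2, 3)], B returns [(2, 1), (4, 1)]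
import Mathlib
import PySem

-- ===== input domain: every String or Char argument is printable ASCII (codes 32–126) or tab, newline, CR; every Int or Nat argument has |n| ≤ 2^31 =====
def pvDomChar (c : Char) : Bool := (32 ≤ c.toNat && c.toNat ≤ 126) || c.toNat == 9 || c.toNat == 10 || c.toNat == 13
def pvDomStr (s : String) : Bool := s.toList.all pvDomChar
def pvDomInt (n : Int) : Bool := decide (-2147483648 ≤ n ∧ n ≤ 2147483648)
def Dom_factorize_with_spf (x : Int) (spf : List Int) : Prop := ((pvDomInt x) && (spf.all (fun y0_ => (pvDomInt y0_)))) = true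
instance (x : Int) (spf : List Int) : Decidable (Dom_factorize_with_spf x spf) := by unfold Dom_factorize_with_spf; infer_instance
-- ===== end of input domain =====

-- B replaces A's nested iterative loops by a single structural recursion that merges each
-- prime into the head of the recursive result (same asymptotic cost; different algorithm shape).


-- ===== PORT A =====
-- inner 'while x % p == 0: cnt += 1; x //= p' loop of A.  The fuel argument and the
-- '2 ≤ p ∧ 1 ≤ x' conjuncts are totality guards only: under Pre_ the divisor p from the table
-- satisfies 2 ≤ p, x stays ≥ 1, and fuel x.toNat never runs out (each step divides x by p ≥ 2).
def innerA : Nat → Int → Int → Int → Int × Int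
  | 0, _p, x, cnt => (x, cnt)
  | fuel + 1, p, x, cnt =>
    if PySem.Int.mod x p = 0 ∧ 2 ≤ p ∧ 1 ≤ x then
      innerA fuel p (PySem.Int.floordiv x p) (cnt + 1)
    else (x, cnt)

-- outer 'while x > 1' loop of A carrying the res accumulator; fuel, the 'none' branch
-- (= IndexError on spf[x]) and the '2 ≤ p' test are totality guards, unreachable under Pre_.
def outerA : Nat → Int → List Int → List (Int × Int) → List (Int × Int)
  | 0, _x, _spf, res => res
  | fuel + 1, x, spf, res =>
    if 1 < x then
      match PySem.List.pyGet? spf x with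
      | none => res
      | some p =>
        if 2 ≤ p then
          let s := innerA (PySem.Int.floordiv x p).toNat p (PySem.Int.floordiv x p) 1
          outerA fuel s.1 spf (res ++ [(p, s.2)])
        else res
    else res

def factorize_with_spf (x : Int) (spf : List Int) : List (Int × Int) :=
  outerA x.toNat x spf []

-- ===== PORT B =====
-- B's recursion: 'if x <= 1: []; p = spf[x]; rest = recurse(x // p); merge p into rest's head'.
-- The fuel, the 'none' branch (= IndexError) and the '2 ≤ p' test are totality guards only,
-- unreachable under Pre_ (a genuine spf table always yields 2 ≤ p).
def altRec : Nat → Int → List Int → List (Int × Int)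
  | 0, _x, _spf => []
  | fuel + 1, x, spf =>
    if 1 < x then
      match PySem.List.pyGet? spf x with
      | none => []
      | some p =>
        if 2 ≤ p then
          match altRec fuel (PySem.Int.floordiv x p) spf with
          | (q, c) :: tl => if q = p then (p, c + 1) :: tl else (p, 1) :: (q, c) :: tl
          | [] => [(p, 1)]
        else []
    else []

def factorize_with_spf_alt (x : Int) (spf : List Int) : List (Int × Int) :=
  altRec x.toNat x spf

-- ===== PRECONDITION & SPEC =====
-- Pre_ states the function's documented domain ("prime factorization ... for x >= 1" via a
-- smallest-prime-factor table): spf[i] is the least divisor ≥ 2 of i for every index i ≥ 2 and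
-- x is ≤ 1 or an index into the table.  On other inputs A raises (IndexError/ZeroDivisionError),
-- diverges, or returns a value whose grouping and order are accidents of the junk table entries
-- (see the excluded examples cited in the claim).
def SpfTable (spf : List Int) : Prop :=
  ∀ i : Nat, i < spf.length → 2 ≤ i →
    2 ≤ spf.getD i 0 ∧ spf.getD i 0 ∣ (i : Int) ∧
      ∀ d : Nat, d < i → 2 ≤ d → (d : Int) ∣ (i : Int) → spf.getD i 0 ≤ (d : Int)

def Pre_factorize_with_spf (x : Int) (spf : List Int) : Prop :=
  x ≤ 1 ∨ (x < (spf.length : Int) ∧ SpfTable spf)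

instance (x : Int) (spf : List Int) : Decidable (Pre_factorize_with_spf x spf) := by
  unfold Pre_factorize_with_spf SpfTable; infer_instance

def pvWitness_factorize_with_spf : Int × List Int :=
  (12, [0, 0, 2, 3, 2, 5, 2, 7, 2, 3, 2, 11, 2])

def Spec_factorize_with_spf (x : Int) (spf : List Int) (out : List (Int × Int)) : Prop := out = factorize_with_spf_alt x spf
instance (x : Int) (spf : List Int) (out : List (Int × Int)) : Decidable (Spec_factorize_with_spf x spf out) := by unfold Spec_factorize_with_spf; infer_instance

-- ===== CLAIM (what is proved, stated in full; the proofs are below) =====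
def Claim_equal_factorize_with_spf : Prop := ∀ (x : Int) (spf : List Int), Dom_factorize_with_spf x spf → Pre_factorize_with_spf x spf → Spec_factorize_with_spf x spf (factorize_with_spf x spf)

-- ===== LEMMAS AND PROOFS =====

theorem pvDiv_bounds (x p : Int) (hx : 1 ≤ x) (hp : 2 ≤ p) :
    0 ≤ PySem.Int.floordiv x p ∧ PySem.Int.floordiv x p < x := by
  constructor
  · rw [PySem.Int.le_floordiv_iff_mul_le (by omega)]; nlinarith
  · rw [PySem.Int.floordiv_lt_iff_lt_mul (by omega)]; nlinarith

-- both recursions return their base value once x ≤ 1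
theorem outerA_stop (f : Nat) (x : Int) (spf : List Int) (res : List (Int × Int))
    (hx : ¬ 1 < x) : outerA f x spf res = res := by
  cases f <;> simp [outerA, hx]

theorem altRec_stop (f : Nat) (x : Int) (spf : List Int)
    (hx : ¬ 1 < x) : altRec f x spf = [] := by
  cases f <;> simp [altRec, hx]

-- any two sufficient fuels give B's recursion the same result
theorem altRec_fuel : ∀ (f g : Nat) (x : Int) (spf : List Int),
    x.toNat ≤ f → x.toNat ≤ g → altRec f x spf = altRec g x spf := by
  intro f
  induction f with
  | zero =>
    intro g x spf hf hg
    rw [altRec_stop 0 x spf (by omega), altRec_stop g x spf (by omega)]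
  | succ f ih =>
    intro g x spf hf hg
    by_cases hx : 1 < x
    · cases g with
      | zero => omega
      | succ g =>
        simp only [altRec, if_pos hx]
        cases hget : PySem.List.pyGet? spf x with
        | none => rfl
        | some p =>
          simp only []
          by_cases h2 : 2 ≤ p
          · simp only [if_pos h2]
            have hb := pvDiv_bounds x p (by omega) h2
            rw [ih g _ spf (by omega) (by omega)]
          · simp only [if_neg h2]
    · rw [altRec_stop _ x spf hx, altRec_stop g x spf hx]

-- the counter of A's inner loop is a pure offset
theorem innerA_shift : ∀ (f : Nat) (p z c : Int),
    innerA f p z c = ((innerA f p z 0).1, c + (innerA f p z 0).2) := by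
  intro f
  induction f with
  | zero => intro p z c; simp [innerA]
  | succ f ih =>
    intro p z c
    by_cases hc : PySem.Int.mod z p = 0 ∧ 2 ≤ p ∧ 1 ≤ z
    · simp only [innerA, if_pos hc]
      rw [ih p _ (c + 1), ih p _ (0 + 1)]
      simp only [Prod.mk.injEq, true_and]
      ring
    · simp [innerA, hc]

-- A's inner loop stops at once when p does not divide z
theorem innerA_nodvd (f : Nat) (p z c : Int) (h : ¬ p ∣ z) : innerA f p z c = (z, c) := by
  cases f with
  | zero => rfl
  | succ f =>
    rw [innerA, if_neg]
    rw [PySem.Int.mod_eq_zero_iff_dvd]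
    tauto

-- 'p is a lower bound of the divisors ≥ 2 of z'
def pvLB (p z : Int) : Prop := ∀ e : Int, 2 ≤ e → e ∣ z → p ≤ e

-- reading a genuine spf table at an in-range index 2 ≤ z
theorem table_get (spf : List Int) (htab : SpfTable spf) (z : Int) (hz1 : 1 < z)
    (hlen : z < (spf.length : Int)) :
    ∃ p, PySem.List.pyGet? spf z = some p ∧ 2 ≤ p ∧ p ∣ z ∧ pvLB p z := by
  have hz0 : 0 ≤ z := by omega
  have hznat : z.toNat < spf.length := by omega
  have hcast : ((z.toNat : Nat) : Int) = z := Int.toNat_of_nonneg hz0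
  obtain ⟨hq2, hqd, hmin⟩ := htab z.toNat hznat (by omega)
  rw [List.getD_eq_getElem spf 0 hznat] at hq2 hqd hmin
  rw [hcast] at hqd hmin
  refine ⟨spf[z.toNat], ?_, hq2, hqd, ?_⟩
  · rw [PySem.List.pyGet?_of_nonneg spf hz0, List.getElem?_eq_getElem hznat]
  · intro e he2 hed
    have hez : e ≤ z := Int.le_of_dvd (by omega) hed
    rcases lt_or_eq_of_le hez with hlt | heq
    · have h1 : ((e.toNat : Nat) : Int) = e := Int.toNat_of_nonneg (by omega)
      have := hmin e.toNat (by omega) (by omega) (by rw [h1]; exact hed)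
      rwa [h1] at this
    · have : spf[z.toNat] ≤ z := Int.le_of_dvd (by omega) hqd
      omega

-- when p is itself a divisor ≥ 2 of z bounding all divisors below, the table yields p
theorem table_at (spf : List Int) (htab : SpfTable spf) (z p : Int) (hz1 : 1 < z)
    (hlen : z < (spf.length : Int)) (hp2 : 2 ≤ p) (hpd : p ∣ z) (hlb : pvLB p z) :
    PySem.List.pyGet? spf z = some p := by
  obtain ⟨q, hget, hq2, hqd, hqlb⟩ := table_get spf htab z hz1 hlen
  have h1 : p ≤ q := hlb q hq2 hqd
  have h2 : q ≤ p := hqlb p hp2 hpd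
  rw [hget]
  congr 1
  omega

-- A's outer loop only appends to its accumulator
theorem outerA_append : ∀ (f : Nat) (x : Int) (spf : List Int) (res : List (Int × Int)),
    outerA f x spf res = res ++ outerA f x spf [] := by
  intro f
  induction f with
  | zero => intro x spf res; simp [outerA]
  | succ f ih =>
    intro x spf res
    by_cases hx : 1 < x
    · simp only [outerA, if_pos hx]
      cases hget : PySem.List.pyGet? spf x with
      | none => simp
      | some p =>
        simp only []
        by_cases h2 : 2 ≤ p
        · simp only [if_pos h2]
          rw [ih _ spf (res ++ [(p, _)]), ih _ spf ([] ++ [(p, _)])]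
          simp
        · simp only [if_neg h2]; simp
    · simp only [outerA, if_neg hx]; simp

-- the head key of B's recursion, when present, divides its argument
theorem altRec_head (f : Nat) (spf : List Int) (htab : SpfTable spf) (z : Int)
    (_hz1 : 1 ≤ z) (hlen : z < (spf.length : Int)) :
    altRec f z spf = [] ∨ ∃ q c tl, altRec f z spf = (q, c) :: tl ∧ q ∣ z := by
  cases f with
  | zero => left; rfl
  | succ f =>
    by_cases hx : 1 < z
    · obtain ⟨p, hget, hp2, hpd, _⟩ := table_get spf htab z hx hlen
      right
      simp only [altRec, if_pos hx, hget, if_pos hp2]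
      cases altRec f (PySem.Int.floordiv z p) spf with
      | nil => exact ⟨p, 1, [], rfl, hpd⟩
      | cons hd tl =>
        obtain ⟨q, c⟩ := hd
        by_cases hq : q = p
        · exact ⟨p, c + 1, tl, by simp [hq], hpd⟩
        · exact ⟨p, 1, (q, c) :: tl, by simp [hq], hpd⟩
    · left; exact altRec_stop _ z spf hx

-- B inside one of A's inner runs: while p divides z the table returns p again, so the
-- head-merge of B collapses the whole run into one (p, exponent) pair, exactly the pair
-- A's inner counter produces
theorem runAlt : ∀ (fI : Nat) (spf : List Int), SpfTable spf → ∀ (p : Int), 2 ≤ p →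
    ∀ (z : Int) (fB : Nat), z.toNat ≤ fI → z.toNat ≤ fB →
    1 ≤ z → z < (spf.length : Int) → pvLB p z → p ∣ z →
    altRec fB z spf
        = (p, (innerA fI p z 0).2) :: altRec (innerA fI p z 0).1.toNat (innerA fI p z 0).1 spf
      ∧ 1 ≤ (innerA fI p z 0).1 ∧ (innerA fI p z 0).1 ∣ z ∧ ¬ p ∣ (innerA fI p z 0).1 := by
  intro fI spf htab
  induction fI with
  | zero =>
    intro p hp z fB hfI hfB hz1 hlen hlb hdv
    have : p ≤ z := Int.le_of_dvd (by omega) hdv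
    omega
  | succ fI ih =>
    intro p hp z fB hfI hfB hz1 hlen hlb hdv
    have hpz : p ≤ z := Int.le_of_dvd (by omega) hdv
    have hz2 : 1 < z := by omega
    have hcond : PySem.Int.mod z p = 0 ∧ 2 ≤ p ∧ 1 ≤ z :=
      ⟨by rw [PySem.Int.mod_eq_zero_iff_dvd]; exact hdv, hp, by omega⟩
    have hd := pvDiv_bounds z p (by omega) hp
    have hfd : PySem.Int.floordiv z p = z / p := PySem.Int.floordiv_eq_ediv_of_pos (by omega)
    have hmul : PySem.Int.floordiv z p * p = z := by rw [hfd]; exact Int.ediv_mul_cancel hdv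
    have hfd1 : 1 ≤ PySem.Int.floordiv z p := by
      rw [PySem.Int.le_floordiv_iff_mul_le (by omega)]; omega
    have hfddvd : PySem.Int.floordiv z p ∣ z := ⟨p, hmul.symm⟩
    have hget : PySem.List.pyGet? spf z = some p := table_at spf htab z p hz2 hlen hp hdv hlb
    have hlb' : pvLB p (PySem.Int.floordiv z p) :=
      fun e he2 hed => hlb e he2 (dvd_trans hed hfddvd)
    cases fB with
    | zero => omega
    | succ fB =>
      simp only [altRec, if_pos hz2, hget, if_pos hp]
      simp only [innerA, if_pos hcond, zero_add]
      rw [innerA_shift fI p (PySem.Int.floordiv z p) 1]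
      by_cases hdv' : p ∣ PySem.Int.floordiv z p
      · obtain ⟨hrec, h1, hdvd, hnd⟩ := ih p hp (PySem.Int.floordiv z p) fB
          (by omega) (by omega) hfd1 (by omega) hlb' hdv'
        rw [hrec]
        refine ⟨?_, h1, dvd_trans hdvd hfddvd, hnd⟩
        simp [add_comm]
      · rw [innerA_nodvd fI p (PySem.Int.floordiv z p) 0 hdv']
        simp only []
        rcases altRec_head fB spf htab (PySem.Int.floordiv z p) hfd1 (by omega) with hnil | ⟨q, c, tl, hcons, hqd⟩
        · rw [altRec_fuel fB (PySem.Int.floordiv z p).toNat _ spf (by omega) le_rfl] at hnil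
          rw [altRec_fuel fB (PySem.Int.floordiv z p).toNat _ spf (by omega) le_rfl, hnil]
          exact ⟨rfl, hfd1, hfddvd, hdv'⟩
        · have hqp : q ≠ p := fun h => hdv' (h ▸ hqd)
          rw [altRec_fuel fB (PySem.Int.floordiv z p).toNat _ spf (by omega) le_rfl] at hcons
          rw [altRec_fuel fB (PySem.Int.floordiv z p).toNat _ spf (by omega) le_rfl, hcons]
          simp only [if_neg hqp]
          exact ⟨rfl, hfd1, hfddvd, hdv'⟩

-- main equivalence: on a genuine table B's recursion produces exactly the pairs A appends
theorem main : ∀ (n : Nat) (spf : List Int), SpfTable spf →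
    ∀ (x : Int) (fA fB : Nat),
    x.toNat ≤ n → x.toNat ≤ fA → x.toNat ≤ fB → x < (spf.length : Int) →
    altRec fB x spf = outerA fA x spf [] := by
  intro n spf htab
  induction n with
  | zero =>
    intro x fA fB hn hfA hfB hlen
    rw [altRec_stop fB x spf (by omega), outerA_stop fA x spf [] (by omega)]
  | succ n ih =>
    intro x fA fB hn hfA hfB hlen
    by_cases hx : 1 < x
    · obtain ⟨p, hget, hp2, hpd, hlb⟩ := table_get spf htab x hx hlen
      obtain ⟨hrec, h1, hdvd, hnd⟩ := runAlt x.toNat spf htab p hp2 x fB le_rfl hfB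
        (by omega) hlen hlb hpd
      have hd := pvDiv_bounds x p (by omega) hp2
      have hfd : PySem.Int.floordiv x p = x / p := PySem.Int.floordiv_eq_ediv_of_pos (by omega)
      have hmul : PySem.Int.floordiv x p * p = x := by rw [hfd]; exact Int.ediv_mul_cancel hpd
      -- relate innerA at x (B side) with innerA at x//p starting from 1 (A side)
      have hcond : PySem.Int.mod x p = 0 ∧ 2 ≤ p ∧ 1 ≤ x :=
        ⟨by rw [PySem.Int.mod_eq_zero_iff_dvd]; exact hpd, hp2, by omega⟩
      have hstep : innerA x.toNat p x 0
          = innerA (x.toNat - 1) p (PySem.Int.floordiv x p) 1 := by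
        have hxpos : x.toNat = (x.toNat - 1) + 1 := by omega
        rw [hxpos]
        simp [innerA, hcond]
      have hfuel : ∀ c : Int, innerA (x.toNat - 1) p (PySem.Int.floordiv x p) c
          = innerA (PySem.Int.floordiv x p).toNat p (PySem.Int.floordiv x p) c := by
        -- fuel independence of innerA above the argument's size
        intro c
        clear hrec h1 hdvd hnd hstep
        have hgen : ∀ (f g : Nat) (z c : Int), z.toNat ≤ f → z.toNat ≤ g →
            innerA f p z c = innerA g p z c := by
          intro f
          induction f with
          | zero =>
            intro g z c hf hg
            have hz : ¬ (PySem.Int.mod z p = 0 ∧ 2 ≤ p ∧ 1 ≤ z) := by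
              rintro ⟨-, -, h⟩; omega
            cases g <;> simp [innerA, hz]
          | succ f ihf =>
            intro g z c hf hg
            by_cases hc : PySem.Int.mod z p = 0 ∧ 2 ≤ p ∧ 1 ≤ z
            · cases g with
              | zero => omega
              | succ g =>
                simp only [innerA, if_pos hc]
                have hb := pvDiv_bounds z p hc.2.2 hp2
                exact ihf g _ _ (by omega) (by omega)
            · cases g <;> simp [innerA, hc]
        exact hgen _ _ _ c (by omega) (by omega)
      cases fA with
      | zero => omega
      | succ fA =>
        simp only [outerA, if_pos hx, hget, if_pos hp2]
        rw [outerA_append fA _ spf ([] ++ [(p, _)])]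
        rw [hrec, hstep, hfuel 1]
        set s := innerA (PySem.Int.floordiv x p).toNat p (PySem.Int.floordiv x p) 1 with hs
        rw [hstep, hfuel 1] at hdvd h1 hnd
        have hsx : s.1 < x := by
          have hle : s.1 ≤ x := Int.le_of_dvd (by omega) hdvd
          rcases lt_or_eq_of_le hle with h | h
          · exact h
          · exact absurd (by rw [h]; exact hpd) hnd
        rw [ih s.1 fA s.1.toNat (by omega) (by omega) le_rfl (by omega)]
        simp
    · rw [altRec_stop fB x spf hx, outerA_stop fA x spf [] hx]

-- ===== VERDICT (by name: the statement is the Claim_ definition above) =====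
theorem factorize_with_spf_spec : Claim_equal_factorize_with_spf := by
  intro x spf _hdom hpre
  unfold Spec_factorize_with_spf factorize_with_spf factorize_with_spf_alt
  rcases hpre with hle | ⟨hlen, htab⟩
  · rw [outerA_stop _ x spf [] (by omega), altRec_stop _ x spf (by omega)]
  · exact (main x.toNat spf htab x x.toNat x.toNat le_rfl le_rfl le_rfl hlen).symm
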